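-- pv_equiv track=rewrite | github.com/Olivia926/All_Trophies_Help | All_Trophies_RNG/ShortestPath.py | start_rng_steps
-- ===== SOURCE A (Python) =====
-- def start_rng_steps(val):
--     rng = 0
--
--     for i in range(val):
--         if i == 0:
--             rng += 7
--         else:
--             rng += 3
--
--     return [rng, val]
-- ===== SOURCE B (Python) =====
-- def start_rng_steps(val):
--     # Closed form: first step adds 7, each later step adds 3.
--     rng = 0 if val <= 0 else 7 + 3 * (val - 1)
--     return [rng, val]
-- ===== Notes on version B (the rewrite author's own statement) =====
-- stated objective: faster
-- what changed: Replaces the O(val) accumulation loop with the closed-form 7 + 3*(val-1) (0 when val <= 0).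
import Mathlib
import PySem

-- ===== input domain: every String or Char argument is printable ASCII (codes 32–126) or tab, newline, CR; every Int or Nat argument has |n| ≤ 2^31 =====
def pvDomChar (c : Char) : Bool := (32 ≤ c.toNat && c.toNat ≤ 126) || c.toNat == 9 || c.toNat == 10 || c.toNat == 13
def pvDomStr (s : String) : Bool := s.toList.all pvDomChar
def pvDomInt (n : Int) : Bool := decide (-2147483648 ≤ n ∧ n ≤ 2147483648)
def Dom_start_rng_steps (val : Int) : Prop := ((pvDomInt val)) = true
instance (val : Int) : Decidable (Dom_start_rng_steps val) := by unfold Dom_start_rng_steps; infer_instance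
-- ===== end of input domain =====

-- ===== PORT A =====
def start_rng_steps (val : Int) : List Int :=
  let rng := (PySem.List.pyRange 0 val 1).foldl (fun r i => if i == 0 then r + 7 else r + 3) 0
  [rng, val]

-- ===== PORT B =====
-- B: closed form; one honest line: replaces the loop by 7 + 3*(val-1) (0 when val <= 0); faster (asymptotic)
def start_rng_steps_alt (val : Int) : List Int :=
  let rng := if val ≤ 0 then 0 else 7 + 3 * (val - 1)
  [rng, val]

-- ===== PRECONDITION & SPEC =====
def Spec_start_rng_steps (val : Int) (out : List Int) : Prop := out = start_rng_steps_alt val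
instance (val : Int) (out : List Int) : Decidable (Spec_start_rng_steps val out) := by unfold Spec_start_rng_steps; infer_instance

-- ===== CLAIM (what is proved, stated in full; the proofs are below) =====
def Claim_equal_start_rng_steps : Prop := ∀ (val : Int), Dom_start_rng_steps val → Spec_start_rng_steps val (start_rng_steps val)

-- ===== LEMMAS AND PROOFS =====

-- ===== VERDICT (by name: the statement is the Claim_ definition above) =====
-- the loop over range(1, 1+n) adds 3 each step
theorem tail_fold (n : Nat) (acc : Int) :
    (PySem.List.pyRange 1 (1 + n) 1).foldl (fun r i => if i == 0 then r + 7 else r + 3) acc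
      = acc + 3 * n := by
  induction n generalizing acc with
  | zero => simp [PySem.List.pyRange_one_eq_nil]
  | succ k ih =>
    have h : (1 : Int) + (k + 1 : Nat) = (1 + (k : Int)) + 1 := by push_cast; ring
    rw [h, PySem.List.pyRange_one_succ_right (by omega), List.foldl_append]
    simp only [List.foldl]
    rw [ih]
    have : ((1 : Int) + k == 0) = false := by simp; omega
    rw [this]
    push_cast; ring

theorem start_rng_steps_spec : Claim_equal_start_rng_steps := by
  intro val _
  unfold Spec_start_rng_steps start_rng_steps start_rng_steps_alt
  by_cases h : val ≤ 0
  · simp [PySem.List.pyRange_one_eq_nil h, h]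
  · have hv : val = 1 + ((val - 1).toNat : Int) := by omega
    rw [PySem.List.pyRange_one_cons (by omega : (0:Int) < val)]
    simp only [List.foldl, show ((0:Int) == 0) = true from rfl, if_true, zero_add]
    have h1 : PySem.List.pyRange 1 val 1 = PySem.List.pyRange 1 (1 + ((val - 1).toNat : Int)) 1 := by
      rw [← hv]
    rw [h1, tail_fold, if_neg h]
    have h2 : (7 : Int) + 3 * ((val - 1).toNat : Int) = 7 + 3 * (val - 1) := by omega
    rw [h2]
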